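-- pv_equiv track=rewrite | github.com/whglamrock/leetcode_series | leetcode1092 Shortest Common Supersequence.py | splitStringBySubsequence
-- ===== SOURCE A (Python) =====
-- from typing import List
--
-- def splitStringBySubsequence(subsequence: str, originalStr: str) -> List[str]:
--     j = 0
--     splitSubStrs = []
--     for char in originalStr:
--         if j >= len(subsequence):
--             splitSubStrs.append(char)
--             continue
--         if char == subsequence[j]:
--             splitSubStrs.append("subsqs:" + char)
--             j += 1
--         else:
--             splitSubStrs.append(char)
--
--     return splitSubStrs
-- ===== SOURCE B (Python) =====
-- from typing import List
--
-- def splitStringBySubsequence(subsequence: str, originalStr: str) -> List[str]: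
--     # pass 1: greedy walk recording only the matched positions
--     matched = set()
--     j = 0
--     for i, ch in enumerate(originalStr):
--         if j >= len(subsequence):
--             break
--         if ch == subsequence[j]:
--             matched.add(i)
--             j += 1
--     # pass 2: build the output from the matched-position set
--     return [("subsqs:" + ch) if i in matched else ch
--             for i, ch in enumerate(originalStr)]
-- ===== Notes on version B (the rewrite author's own statement) =====
-- stated objective: alternative
-- what changed: Replaces A's single fused loop (pointer j plus output list in one pass) with two separately-shaped passes: a greedy two-pointer walk that only records the set of matched indices, then an enumerate-driven comprehension that builds the output from that set.
import Mathlib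
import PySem

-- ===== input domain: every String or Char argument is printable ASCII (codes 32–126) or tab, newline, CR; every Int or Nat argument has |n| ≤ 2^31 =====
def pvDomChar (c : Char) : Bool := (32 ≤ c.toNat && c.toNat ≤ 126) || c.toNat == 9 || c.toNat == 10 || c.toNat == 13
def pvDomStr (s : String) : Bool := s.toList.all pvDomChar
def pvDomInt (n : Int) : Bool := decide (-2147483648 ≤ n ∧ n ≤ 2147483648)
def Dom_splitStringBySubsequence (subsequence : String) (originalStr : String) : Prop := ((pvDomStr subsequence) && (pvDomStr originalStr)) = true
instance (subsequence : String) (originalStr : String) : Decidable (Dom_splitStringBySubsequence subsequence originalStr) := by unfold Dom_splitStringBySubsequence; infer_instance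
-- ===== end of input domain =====

-- B replaces A's fused single loop with two passes (greedy match-position set, then an indexed build); objective: alternative decomposition, same cost.

-- ===== PORT A =====
-- one step of A's for-loop; subsequence[j] is only read under the guard j < len(subsequence), so the pyGetD default is never used there
def pvStepA (subsequence : String) (st : Int × List String) (c : Char) : Int × List String :=
  if st.1 ≥ PySem.Str.len subsequence then (st.1, st.2 ++ [String.mk [c]])
  else if c = PySem.List.pyGetD subsequence.toList st.1 (Char.ofNat 0) then
    (st.1 + 1, st.2 ++ ["subsqs:" ++ String.mk [c]])
  else (st.1, st.2 ++ [String.mk [c]])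

def splitStringBySubsequence (subsequence : String) (originalStr : String) : List String :=
  (originalStr.toList.foldl (pvStepA subsequence) ((0 : Int), ([] : List String))).2

-- ===== PORT B =====
-- pass 1 of Source B: the set of indices i where the greedy walk matches subsequence[j];
-- the indices are produced distinct and increasing, so this list is exactly the Python set's contents
def pvGreedyIdx : List Char → List Char → Nat → List Nat
  | _, [], _ => []
  | [], _ :: _, _ => []
  | c :: cs, s :: ss, i => if c = s then i :: pvGreedyIdx cs ss (i + 1) else pvGreedyIdx cs (s :: ss) (i + 1)

-- pass 2 of Source B: the enumerate-comprehension, index carried explicitly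
def pvRender : List Char → Nat → List Nat → List String
  | [], _, _ => []
  | c :: cs, i, m =>
    (if i ∈ m then "subsqs:" ++ String.mk [c] else String.mk [c]) :: pvRender cs (i + 1) m

def splitStringBySubsequence_alt (subsequence : String) (originalStr : String) : List String :=
  pvRender originalStr.toList 0 (pvGreedyIdx originalStr.toList subsequence.toList 0)

-- ===== PRECONDITION & SPEC =====
def Spec_splitStringBySubsequence (subsequence : String) (originalStr : String) (out : List String) : Prop := out = splitStringBySubsequence_alt subsequence originalStr
instance (subsequence : String) (originalStr : String) (out : List String) : Decidable (Spec_splitStringBySubsequence subsequence originalStr out) := by unfold Spec_splitStringBySubsequence; infer_instance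

-- ===== CLAIM (what is proved, stated in full; the proofs are below) =====
def Claim_equal_splitStringBySubsequence : Prop := ∀ (subsequence : String) (originalStr : String), Dom_splitStringBySubsequence subsequence originalStr → Spec_splitStringBySubsequence subsequence originalStr (splitStringBySubsequence subsequence originalStr)

-- ===== LEMMAS AND PROOFS =====

-- common reference shape: the fused loop expressed structurally on the remaining subsequence
def pvFused : List Char → List Char → List String
  | [], _ => []
  | c :: cs, [] => String.mk [c] :: pvFused cs []
  | c :: cs, s :: ss =>
    if c = s then ("subsqs:" ++ String.mk [c]) :: pvFused cs ss
    else String.mk [c] :: pvFused cs (s :: ss)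

theorem pvGreedyIdx_nil_sub (cs : List Char) (i : Nat) : pvGreedyIdx cs [] i = [] := by
  cases cs <;> rfl

theorem pvGreedyIdx_lb (cs ss : List Char) (i : Nat) :
    ∀ k ∈ pvGreedyIdx cs ss i, i ≤ k := by
  induction cs generalizing ss i with
  | nil => cases ss <;> simp [pvGreedyIdx]
  | cons c cs ih =>
    cases ss with
    | nil => simp [pvGreedyIdx]
    | cons s ss =>
      intro k hk
      simp only [pvGreedyIdx] at hk
      split at hk
      · rcases List.mem_cons.1 hk with h | h
        · omega
        · have := ih ss (i + 1) k h; omega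
      · have := ih (s :: ss) (i + 1) k hk; omega

theorem pvRender_drop (cs : List Char) (n a : Nat) (m : List Nat) (h : a < n) :
    pvRender cs n (a :: m) = pvRender cs n m := by
  induction cs generalizing n with
  | nil => rfl
  | cons c cs ih =>
    simp only [pvRender, List.mem_cons]
    rw [ih (n + 1) (by omega)]
    congr 1
    have : ¬ n = a := by omega
    simp [this]

theorem pvRender_greedy (cs ss : List Char) (i : Nat) :
    pvRender cs i (pvGreedyIdx cs ss i) = pvFused cs ss := by
  induction cs generalizing ss i with
  | nil => cases ss <;> rfl
  | cons c cs ih =>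
    cases ss with
    | nil =>
      have h := ih [] (i + 1)
      rw [pvGreedyIdx_nil_sub] at h
      simp [pvGreedyIdx, pvRender, pvFused, h]
    | cons s ss =>
      simp only [pvGreedyIdx, pvFused]
      by_cases hcs : c = s
      · simp only [hcs, if_true, pvRender, List.mem_cons]
        rw [pvRender_drop cs (i + 1) i _ (by omega)]
        simp [ih ss (i + 1)]
      · simp only [hcs, if_false, pvRender]
        have hnot : i ∉ pvGreedyIdx cs (s :: ss) (i + 1) := by
          intro h; have := pvGreedyIdx_lb cs (s :: ss) (i + 1) i h; omega
        simp [hnot, ih (s :: ss) (i + 1)]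

set_option maxRecDepth 4000 in
theorem pvFoldA_eq (subsequence : String) (cs : List Char) (j : Nat) (acc : List String)
    (hj : j ≤ subsequence.toList.length) :
    (cs.foldl (pvStepA subsequence) ((j : Int), acc)).2
      = acc ++ pvFused cs (subsequence.toList.drop j) := by
  induction cs generalizing j acc with
  | nil => simp [pvFused]
  | cons c cs ih =>
    simp only [List.foldl_cons, pvStepA]
    by_cases hge : (j : Int) ≥ PySem.Str.len subsequence
    · have hj' : j = subsequence.toList.length := by
        simp only [PySem.Str.len_eq] at hge
        omega
      have hdrop : subsequence.toList.drop j = [] := by simp [hj']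
      simp only [hge, if_true]
      rw [ih j _ hj]
      simp [hdrop, pvFused]
    · have hlt : j < subsequence.toList.length := by
        simp only [PySem.Str.len_eq] at hge
        omega
      have hget : PySem.List.pyGetD subsequence.toList (j : Int) (Char.ofNat 0)
          = subsequence.toList[j] := by
        rw [PySem.List.pyGetD_natCast]
        exact List.getD_eq_getElem _ _ hlt
      have hdrop : subsequence.toList.drop j
          = subsequence.toList[j] :: subsequence.toList.drop (j + 1) :=
        List.drop_eq_getElem_cons hlt
      simp only [hge, if_false, hget]
      by_cases hc : c = subsequence.toList[j]
      · simp only [hc, if_true]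
        have : ((j : Int) + 1) = ((j + 1 : Nat) : Int) := by push_cast; ring
        rw [this, ih (j + 1) _ (by omega), hdrop]
        simp only [pvFused]
        simp
      · simp only [hc, if_false]
        rw [ih j _ hj, hdrop]
        simp only [pvFused]
        simp [hc]

-- ===== VERDICT (by name: the statement is the Claim_ definition above) =====
theorem splitStringBySubsequence_spec : Claim_equal_splitStringBySubsequence := by
  intro subsequence originalStr _
  unfold Spec_splitStringBySubsequence splitStringBySubsequence splitStringBySubsequence_alt
  have h0 : ((0 : Nat) : Int) = (0 : Int) := rfl
  rw [← h0, pvFoldA_eq subsequence originalStr.toList 0 [] (by omega)]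
  simp [pvRender_greedy]
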